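-- pv_equiv track=rewrite | github.com/mikesmithrem-lgtm/rolling-horizon | main3_ls.py | check_machine_feasibility
-- ===== SOURCE A (Python) =====
-- from collections import defaultdict
--
-- def check_machine_feasibility(multi_machine_avail):
--     """
--     检查multi_machine_avail中每台机器的可用区间是否无重叠。
--     multi_machine_avail: List[Dict[machine, (start, end)]]
--     返回: True（无重叠）或 False（有重叠）
--     """
--     machine_intervals = defaultdict(list)
--     for avail in multi_machine_avail:
--         for machine, (start, end) in avail.items():
--             machine_intervals[machine].append((start, end))
--     for intervals in machine_intervals.values():
--         intervals.sort()
--         for i in range(1, len(intervals)):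
--             if intervals[i][0] < intervals[i-1][1]:
--                 return False
--     return True
-- ===== SOURCE B (Python) =====
-- def _compatible(a, b):
--     """Two intervals conflict unless, taken in order, the earlier one has
--     ended by the time the later one starts (touching endpoints allowed)."""
--     earlier, later = min(a, b), max(a, b)
--     return earlier[1] <= later[0]
--
--
-- def check_machine_feasibility(multi_machine_avail):
--     entries = []
--     for avail in multi_machine_avail:
--         for machine, interval in avail.items():
--             entries.append((machine, interval))
--     for idx, (machine, interval) in enumerate(entries):
--         for other_machine, other in entries[idx + 1:]:
--             if other_machine == machine and not _compatible(interval, other):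
--                 return False
--     return True
-- ===== Notes on version B (the rewrite author's own statement) =====
-- stated objective: alternative
-- what changed: Replaces the group-by-machine dict plus per-machine sort and adjacent-pair scan with a flat sort-free pairwise check: each pair of same-machine intervals is tested directly for overlap (the earlier of the two, by min/max, must end before the later starts), so no dict of lists and no sorting is needed.
import Mathlib
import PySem

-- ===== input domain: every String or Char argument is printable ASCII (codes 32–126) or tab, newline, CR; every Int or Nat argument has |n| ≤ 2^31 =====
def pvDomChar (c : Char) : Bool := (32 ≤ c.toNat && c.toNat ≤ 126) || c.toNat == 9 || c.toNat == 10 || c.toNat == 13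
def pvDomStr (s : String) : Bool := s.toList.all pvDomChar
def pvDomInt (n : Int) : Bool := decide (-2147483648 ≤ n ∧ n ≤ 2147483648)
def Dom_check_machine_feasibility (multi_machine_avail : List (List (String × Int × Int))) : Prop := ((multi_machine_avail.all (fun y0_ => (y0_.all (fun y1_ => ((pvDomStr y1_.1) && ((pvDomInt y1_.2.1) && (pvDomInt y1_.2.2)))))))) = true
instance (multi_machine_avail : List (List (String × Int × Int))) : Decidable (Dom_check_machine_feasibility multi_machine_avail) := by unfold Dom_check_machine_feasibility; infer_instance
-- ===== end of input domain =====

-- B replaces A's group-by-machine dict + per-machine sort + adjacent scan by a flat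
-- sort-free pairwise check: every two same-machine intervals, taken in order, must not
-- overlap (objective: alternative algorithm of similar size; not claimed faster).


-- ===== PORT A =====
-- inner loop of A: intervals.sort(); for i in range(1, len): if intervals[i][0] < intervals[i-1][1]: return False
def pvA_checkIntervals (intervals : List (Int × Int)) : Bool :=
  let s := PySem.List.sorted2 intervals (fun p => p.1) (fun p => p.2)
  (PySem.List.pyRange 1 (PySem.List.len s) 1).all (fun i =>
    !decide ((PySem.List.pyGetD s i (0, 0)).1 < (PySem.List.pyGetD s (i - 1) (0, 0)).2))

def check_machine_feasibility (multi_machine_avail : List (List (String × Int × Int))) : Bool :=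
  -- machine_intervals = defaultdict(list); append (start, end) per machine over all dicts
  let machine_intervals : PySem.Dict String (List (Int × Int)) :=
    multi_machine_avail.foldl (fun d avail =>
      (PySem.Dict.ofList avail).items.foldl
        (fun d p => d.modify p.1 [] (fun l => l ++ [p.2])) d)
      PySem.Dict.empty
  machine_intervals.values.all pvA_checkIntervals

-- ===== PORT B =====
-- Python tuple '<' is lexicographic
def pvLexLt (a b : Int × Int) : Bool := a.1 < b.1 || (a.1 == b.1 && a.2 < b.2)

-- _compatible(a, b): earlier, later = min(a, b), max(a, b); earlier[1] <= later[0]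
-- (Python's min/max keep the FIRST argument on a tie)
def pvCompat (a b : Int × Int) : Bool :=
  let earlier := if pvLexLt b a then b else a
  let later := if pvLexLt a b then b else a
  decide (earlier.2 ≤ later.1)

-- head-vs-rest pairwise loop over the flattened entry list
def pvPairwiseOk : List (String × Int × Int) → Bool
  | [] => true
  | e :: rest => rest.all (fun f => f.1 != e.1 || pvCompat e.2 f.2) && pvPairwiseOk rest

def check_machine_feasibility_alt (multi_machine_avail : List (List (String × Int × Int))) : Bool :=
  pvPairwiseOk (multi_machine_avail.flatMap (fun avail => (PySem.Dict.ofList avail).items))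

-- ===== PRECONDITION & SPEC =====
def Spec_check_machine_feasibility (multi_machine_avail : List (List (String × Int × Int))) (out : Bool) : Prop := out = check_machine_feasibility_alt multi_machine_avail
instance (multi_machine_avail : List (List (String × Int × Int))) (out : Bool) : Decidable (Spec_check_machine_feasibility multi_machine_avail out) := by unfold Spec_check_machine_feasibility; infer_instance

-- ===== CLAIM (what is proved, stated in full; the proofs are below) =====
def Claim_equal_check_machine_feasibility : Prop := ∀ (multi_machine_avail : List (List (String × Int × Int))), Dom_check_machine_feasibility multi_machine_avail → Spec_check_machine_feasibility multi_machine_avail (check_machine_feasibility multi_machine_avail)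

-- ===== LEMMAS AND PROOFS =====

-- Prop-level relations the proof moves through
def pvLexLe (a b : Int × Int) : Prop := a.1 < b.1 ∨ (a.1 = b.1 ∧ a.2 ≤ b.2)
def pvRel2 (a b : Int × Int) : Prop := a.2 ≤ b.1 ∧ a.1 ≤ b.1
def pvCompatP (a b : Int × Int) : Prop := pvCompat a b = true
-- the intervals of machine k inside the flat entry list
def pvGrp (l : List (String × Int × Int)) (k : String) : List (Int × Int) :=
  (l.filter (fun p => p.1 == k)).map (fun p => p.2)
-- sorted2's comparator, named
def pvBefore (a b : Int × Int) : Bool :=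
  decide (a.1 < b.1) || (!decide (b.1 < a.1) && decide (a.2 < b.2))

theorem pvCompatP_of_rel2 {a b : Int × Int} (h : pvRel2 a b) : pvCompatP a b := by
  unfold pvRel2 at h
  unfold pvCompatP pvCompat pvLexLt
  split_ifs with h1 h2 <;> simp_all <;> omega

theorem pvRel2_of_compat_lex {a b : Int × Int} (hc : pvCompatP a b) (hl : pvLexLe a b) :
    a.2 ≤ b.1 := by
  unfold pvCompatP pvCompat pvLexLt at hc
  unfold pvLexLe at hl
  split_ifs at hc <;> simp_all <;> omega

theorem pvCompat_symmetric : Symmetric pvCompatP := by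
  intro a b h
  unfold pvCompatP pvCompat pvLexLt at *
  split_ifs at h ⊢ <;> simp_all <;> omega

theorem insertBy_before_cons (x y : Int × Int) (t : List (Int × Int)) :
    PySem.List.insertBy pvBefore x (y :: t) =
      if pvBefore x y then x :: y :: t else y :: PySem.List.insertBy pvBefore x t := by
  simp [PySem.List.insertBy]

theorem insertBy_pairwise_lex (x : Int × Int) (ys : List (Int × Int))
    (h : ys.Pairwise pvLexLe) :
    (PySem.List.insertBy pvBefore x ys).Pairwise pvLexLe := by
  induction ys with
  | nil => simp [PySem.List.insertBy]
  | cons y t ih =>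
    rw [List.pairwise_cons] at h
    rw [insertBy_before_cons]
    by_cases hc : pvBefore x y = true
    · rw [if_pos hc, List.pairwise_cons]
      refine ⟨?_, List.pairwise_cons.mpr h⟩
      intro z hz
      have hxy : pvLexLe x y := by simp [pvBefore] at hc; unfold pvLexLe; omega
      rcases List.mem_cons.mp hz with rfl | hz
      · exact hxy
      · have := h.1 z hz
        unfold pvLexLe at *; omega
    · rw [if_neg hc, List.pairwise_cons]
      refine ⟨?_, ih h.2⟩
      intro z hz
      rcases (PySem.List.mem_insertBy _ _ _ _).mp hz with rfl | hz
      · simp [pvBefore] at hc; unfold pvLexLe; omega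
      · exact h.1 z hz

theorem sorted2_pairwise_lex (L : List (Int × Int)) :
    (PySem.List.sorted2 L (fun p => p.1) (fun p => p.2)).Pairwise pvLexLe := by
  show (L.foldl (fun acc x => PySem.List.insertBy pvBefore x acc) []).Pairwise pvLexLe
  generalize hacc : ([] : List (Int × Int)) = acc
  have hp : acc.Pairwise pvLexLe := by rw [← hacc]; exact List.Pairwise.nil
  clear hacc
  induction L generalizing acc with
  | nil => simpa using hp
  | cons a t ih => exact ih _ (insertBy_pairwise_lex a acc hp)

-- A's indexed adjacent scan over ANY list is the adjacent chain
theorem adjScan_iff_chain (s : List (Int × Int)) :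
    ((PySem.List.pyRange 1 (PySem.List.len s) 1).all (fun i =>
      !decide ((PySem.List.pyGetD s i (0, 0)).1 < (PySem.List.pyGetD s (i - 1) (0, 0)).2))) = true
    ↔ List.IsChain (fun a b : Int × Int => a.2 ≤ b.1) s := by
  rw [List.all_eq_true, List.isChain_iff_getElem]
  constructor
  · intro h i hi
    have hm : (i + 1 : Int) ∈ PySem.List.pyRange 1 (PySem.List.len s) 1 := by
      rw [PySem.List.mem_pyRange_one, PySem.List.len_eq]
      omega
    have hx := h _ hm
    rw [PySem.List.pyGetD_eq_getElem s (0, 0) (by omega) (by omega)] at hx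
    rw [show ((i : Int) + 1 - 1) = (i : Int) by omega] at hx
    rw [PySem.List.pyGetD_eq_getElem s (0, 0) (by omega) (by omega)] at hx
    simp only [Bool.not_eq_eq_eq_not, Bool.not_true, decide_eq_false_iff_not, not_lt] at hx
    have e1 : ((i : Int) + 1).toNat = i + 1 := by omega
    have e2 : ((i : Int)).toNat = i := by omega
    simp only [e1, e2] at hx
    exact hx
  · intro h i hm
    rw [PySem.List.mem_pyRange_one, PySem.List.len_eq] at hm
    rw [PySem.List.pyGetD_eq_getElem s (0, 0) (by omega) (by omega)]
    rw [PySem.List.pyGetD_eq_getElem s (0, 0) (by omega) (by omega)]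
    simp only [Bool.not_eq_eq_eq_not, Bool.not_true, decide_eq_false_iff_not, not_lt]
    have hx := h (i - 1).toNat (by omega)
    simp only [show (i - 1).toNat + 1 = i.toNat from by omega] at hx
    simp only [show (i - 1).toNat = i.toNat - 1 from by omega] at hx
    convert hx using 3; omega

-- per-machine equivalence: sorted adjacent scan = pairwise compatibility
theorem checkIntervals_iff_pairwise (L : List (Int × Int)) :
    pvA_checkIntervals L = true ↔ L.Pairwise pvCompatP := by
  have key := adjScan_iff_chain (PySem.List.sorted2 L (fun p => p.1) (fun p => p.2))
  have hsort := sorted2_pairwise_lex L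
  have hperm : (PySem.List.sorted2 L (fun p => p.1) (fun p => p.2)).Perm L :=
    PySem.List.sorted2_perm ..
  rw [show pvA_checkIntervals L =
      ((PySem.List.pyRange 1 (PySem.List.len (PySem.List.sorted2 L (fun p => p.1) (fun p => p.2))) 1).all
        (fun i => !decide ((PySem.List.pyGetD (PySem.List.sorted2 L (fun p => p.1) (fun p => p.2)) i (0, 0)).1 <
          (PySem.List.pyGetD (PySem.List.sorted2 L (fun p => p.1) (fun p => p.2)) (i - 1) (0, 0)).2))) from rfl]
  rw [key]
  set s := PySem.List.sorted2 L (fun p => p.1) (fun p => p.2) with hs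
  rw [← hperm.pairwise_iff (fun h => pvCompat_symmetric h)]
  constructor
  · intro hchain
    have hadj := List.isChain_iff_getElem.mp hchain
    have hlex := List.pairwise_iff_getElem.mp hsort
    have c2 : List.IsChain pvRel2 s := by
      rw [List.isChain_iff_getElem]
      intro i hi
      refine ⟨hadj i hi, ?_⟩
      have := hlex i (i + 1) (by omega) hi (by omega)
      unfold pvLexLe at this; omega
    haveI : Trans pvRel2 pvRel2 pvRel2 :=
      ⟨fun h1 h2 => by unfold pvRel2 at *; omega⟩
    have p2 : s.Pairwise pvRel2 := List.isChain_iff_pairwise.mp c2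
    exact p2.imp (fun h => pvCompatP_of_rel2 h)
  · intro hcomp
    rw [List.isChain_iff_getElem]
    intro i hi
    have hc := (List.pairwise_iff_getElem.mp hcomp) i (i + 1) (by omega) hi (by omega)
    have hl := (List.pairwise_iff_getElem.mp hsort) i (i + 1) (by omega) hi (by omega)
    exact pvRel2_of_compat_lex hc hl

-- B's loop is Pairwise over the flat list
theorem pvPairwiseOk_iff (l : List (String × Int × Int)) :
    pvPairwiseOk l = true ↔ l.Pairwise (fun e f => e.1 = f.1 → pvCompatP e.2 f.2) := by
  induction l with
  | nil => simp [pvPairwiseOk]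
  | cons e t ih =>
    simp only [pvPairwiseOk, Bool.and_eq_true, List.all_eq_true, List.pairwise_cons, ih]
    constructor
    · rintro ⟨h1, h2⟩
      refine ⟨fun f hf he => ?_, h2⟩
      have h := h1 f hf
      rw [Bool.or_eq_true, bne_iff_ne] at h
      rcases h with h | h
      · exact (h he.symm).elim
      · exact h
    · rintro ⟨h1, h2⟩
      refine ⟨fun f hf => ?_, h2⟩
      rw [Bool.or_eq_true, bne_iff_ne]
      by_cases he : e.1 = f.1
      · exact Or.inr (h1 f hf he)
      · exact Or.inl (fun h => he h.symm)

-- pairwise over the flat list decomposes into the per-machine groups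
theorem pairwise_iff_groups (l : List (String × Int × Int)) :
    l.Pairwise (fun e f => e.1 = f.1 → pvCompatP e.2 f.2) ↔
      ∀ k, (pvGrp l k).Pairwise pvCompatP := by
  induction l with
  | nil => simp [pvGrp]
  | cons e t ih =>
    simp only [List.pairwise_cons, ih]
    constructor
    · rintro ⟨h1, h2⟩ k
      by_cases hk : (e.1 == k) = true
      · simp only [pvGrp, List.filter_cons, hk, if_true, List.map_cons]
        rw [List.pairwise_cons]
        refine ⟨?_, h2 k⟩
        intro b hb
        simp only [List.mem_map, List.mem_filter] at hb
        obtain ⟨p, ⟨hp, hpk⟩, rfl⟩ := hb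
        exact h1 p hp (by rw [beq_iff_eq] at hk hpk; rw [hk, hpk])
      · simpa only [pvGrp, List.filter_cons, hk, if_false] using h2 k
    · intro h
      constructor
      · intro f hf he
        have hh := h e.1
        simp only [pvGrp, List.filter_cons, beq_self_eq_true, if_true, List.map_cons,
          List.pairwise_cons] at hh
        exact hh.1 f.2 (by
          simp only [List.mem_map, List.mem_filter]
          exact ⟨f, ⟨hf, by simp [he.symm]⟩, rfl⟩)
      · intro k
        have hh := h k
        by_cases hk : (e.1 == k) = true
        · simp only [pvGrp, List.filter_cons, hk, if_true, List.map_cons,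
            List.pairwise_cons] at hh
          exact hh.2
        · simpa only [pvGrp, List.filter_cons, hk, if_false] using hh

theorem foldl_over_flatMap {α β γ : Type} (m : List α) (f : α → List β)
    (g : γ → β → γ) (init : γ) :
    m.foldl (fun d a => (f a).foldl g d) init = (m.flatMap f).foldl g init := by
  induction m generalizing init with
  | nil => rfl
  | cons a t ih => simp [List.flatMap_cons, List.foldl_append, ih]

-- A's whole result, characterised through the per-machine groups
theorem portA_iff (m : List (List (String × Int × Int))) :
    check_machine_feasibility m = true ↔
      ∀ k, (pvGrp (m.flatMap (fun avail => (PySem.Dict.ofList avail).items)) k).Pairwise pvCompatP := by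
  set flat := m.flatMap (fun avail => (PySem.Dict.ofList avail).items) with hflat
  have hD : check_machine_feasibility m =
      (flat.foldl (fun d p => d.modify p.1 [] (fun l => l ++ [p.2])) PySem.Dict.empty).values.all
        pvA_checkIntervals := by
    exact congrArg (fun d : PySem.Dict String (List (Int × Int)) => d.values.all pvA_checkIntervals)
      (foldl_over_flatMap m (fun avail => (PySem.Dict.ofList avail).items)
        (fun d p => d.modify p.1 [] (fun l => l ++ [p.2])) PySem.Dict.empty)
  set D := flat.foldl (fun d p => d.modify p.1 [] (fun l => l ++ [p.2])) PySem.Dict.empty with hDdef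
  have hnodup : D.keys.Nodup := by
    rw [hDdef]
    exact PySem.Dict.nodup_keys_foldl_modify_key flat (fun p => p.1) [] (fun _ p l => l ++ [p.2])
      PySem.Dict.empty (by rw [PySem.Dict.keys_empty]; exact List.nodup_nil)
  have hget : ∀ k, D.getD k [] = pvGrp flat k := by
    intro k
    rw [hDdef, PySem.Dict.getD_foldl_modify_append, PySem.Dict.getD_empty]
    simp [pvGrp]
  have hkeys : ∀ p ∈ flat, p.1 ∈ D.keys := by
    intro p hp
    rw [hDdef,
      PySem.Dict.keys_foldl_modify_key flat (fun p => p.1) [] (fun _ p l => l ++ [p.2]),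
      PySem.Dict.keys_empty, PySem.Set.mem_update]
    exact Or.inr (List.mem_map_of_mem hp)
  rw [hD, PySem.Dict.values_eq_map_keys D hnodup [], List.all_map, List.all_eq_true]
  constructor
  · intro h k
    by_cases hk : k ∈ D.keys
    · rw [← hget k]
      exact (checkIntervals_iff_pairwise _).mp (h k hk)
    · have hnil : pvGrp flat k = [] := by
        unfold pvGrp
        rw [List.filter_eq_nil_iff.mpr, List.map_nil]
        intro p hp
        simp only [beq_iff_eq]
        intro hpe
        exact hk (hpe ▸ hkeys p hp)
      rw [hnil]
      exact List.Pairwise.nil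
  · intro h k _
    have := (checkIntervals_iff_pairwise (pvGrp flat k)).mpr (h k)
    simpa [Function.comp, hget k] using this

-- ===== VERDICT (by name: the statement is the Claim_ definition above) =====
theorem check_machine_feasibility_spec : Claim_equal_check_machine_feasibility := by
  intro m _
  unfold Spec_check_machine_feasibility
  have hA := portA_iff m
  have hB := (pvPairwiseOk_iff (m.flatMap (fun avail => (PySem.Dict.ofList avail).items))).trans
    (pairwise_iff_groups _)
  rcases hb : check_machine_feasibility_alt m with _ | _
  · rcases ha : check_machine_feasibility m with _ | _
    · rfl
    · exfalso
      have h1 := hA.mp ha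
      have h2 : check_machine_feasibility_alt m = true := by
        unfold check_machine_feasibility_alt; exact hB.mpr h1
      simp [hb] at h2
  · exact hA.mpr (hB.mp (by unfold check_machine_feasibility_alt at hb; exact hb))
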